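-- pv_equiv track=rewrite | github.com/samvatsan/6.101 | mines/lab.py | get_all_coordinates
-- ===== SOURCE A (Python) =====
-- def get_all_coordinates(dimensions):
--     """
--     Given the dimensions of a game, return a list of tuples of all possible
--     coordinate combinations within that game board recursively.
--     """
--     # base case 1D, dimension is a tuple with 1 element
--     if len(dimensions) == 1:
--         all_coords = []
--         for coord in range(dimensions[0]):
--             all_coords.append((coord,))
--         return all_coords
--     # recursive case
--     all_coords = []
--     first_coords = list(range(dimensions[0]))
--     rest_coords = get_all_coordinates(dimensions[1:])
--     for coor in first_coords: # each element is a number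
--         for r in rest_coords: # each element is a tuple
--             all_coords.append(((coor,)+r))
--     return all_coords
-- ===== SOURCE B (Python) =====
-- def get_all_coordinates(dimensions):
--     """Iterative cartesian product: build coordinate suffixes back-to-front."""
--     result = [()]
--     for d in reversed(dimensions):
--         result = [(c,) + rest for c in range(d) for rest in result]
--     return result
-- ===== Notes on version B (the rewrite author's own statement) =====
-- stated objective: simpler
-- what changed: Replaced the recursion over dimensions (with a special 1-D base case) by a single iterative accumulator that builds coordinate suffixes back-to-front over the reversed dimension list.
import Mathlib
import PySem

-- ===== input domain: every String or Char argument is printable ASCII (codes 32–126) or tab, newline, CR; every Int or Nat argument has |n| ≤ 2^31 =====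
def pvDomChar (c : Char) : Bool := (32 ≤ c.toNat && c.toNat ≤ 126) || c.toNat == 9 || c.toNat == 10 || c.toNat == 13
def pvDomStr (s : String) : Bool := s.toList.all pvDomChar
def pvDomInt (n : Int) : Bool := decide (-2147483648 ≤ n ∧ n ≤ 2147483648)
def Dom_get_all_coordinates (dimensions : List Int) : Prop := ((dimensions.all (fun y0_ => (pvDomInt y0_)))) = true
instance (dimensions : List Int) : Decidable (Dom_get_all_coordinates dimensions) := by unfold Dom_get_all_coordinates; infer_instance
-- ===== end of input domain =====

-- B replaces A's recursion (with a 1-D base case) by one iterative accumulator that builds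
-- coordinate suffixes back-to-front over reversed(dimensions); same return value wherever A
-- returns (Pre_ excludes only the empty list, where A raises IndexError and B returns [()]).

-- ===== PORT A =====
-- A recurses on dimensions[1:]; on [] Python hits dimensions[0] and raises IndexError
-- (excluded by Pre_); the [] branch value here is never claimed.
def get_all_coordinates : List Int → List (List Int)
  | [] => []
  | [d] =>
      -- base case: len(dimensions) == 1
      (PySem.List.pyRange 0 d 1).foldl (fun acc c => acc ++ [[c]]) []
  | d :: rest =>
      -- recursive case
      let first_coords := PySem.List.pyRange 0 d 1
      let rest_coords := get_all_coordinates rest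
      first_coords.foldl (fun acc coor =>
        rest_coords.foldl (fun acc r => acc ++ [coor :: r]) acc) []

-- ===== PORT B =====
def get_all_coordinates_alt (dimensions : List Int) : List (List Int) :=
  dimensions.reverse.foldl
    (fun result d => (PySem.List.pyRange 0 d 1).flatMap (fun c => result.map (c :: ·)))
    [[]]

-- ===== PRECONDITION & SPEC =====
-- Pre_ excludes only the empty dimensions list, on which A raises IndexError.
def Pre_get_all_coordinates (dimensions : List Int) : Prop := dimensions ≠ []
instance (dimensions : List Int) : Decidable (Pre_get_all_coordinates dimensions) := by unfold Pre_get_all_coordinates; infer_instance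
def pvWitness_get_all_coordinates : List Int := [2, 3]


def Spec_get_all_coordinates (dimensions : List Int) (out : List (List Int)) : Prop := out = get_all_coordinates_alt dimensions
instance (dimensions : List Int) (out : List (List Int)) : Decidable (Spec_get_all_coordinates dimensions out) := by unfold Spec_get_all_coordinates; infer_instance

-- ===== CLAIM (what is proved, stated in full; the proofs are below) =====
def Claim_equal_get_all_coordinates : Prop := ∀ (dimensions : List Int), Dom_get_all_coordinates dimensions → Pre_get_all_coordinates dimensions → Spec_get_all_coordinates dimensions (get_all_coordinates dimensions)

-- ===== LEMMAS AND PROOFS =====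

/-- The cartesian product both programs compute, as a straightforward recursion. -/
def pvProd : List Int → List (List Int)
  | [] => [[]]
  | d :: rest => (PySem.List.pyRange 0 d 1).flatMap (fun c => (pvProd rest).map (c :: ·))

theorem alt_foldr_eq (dims : List Int) :
    dims.reverse.foldl
      (fun result d => (PySem.List.pyRange 0 d 1).flatMap (fun c => result.map (c :: ·)))
      [[]] = pvProd dims := by
  rw [List.foldl_reverse]
  induction dims with
  | nil => simp [pvProd]
  | cons d rest ih => rw [List.foldr_cons, ih]; rfl

theorem a_eq_prod (dims : List Int) (h : dims ≠ []) : get_all_coordinates dims = pvProd dims := by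
  induction dims with
  | nil => exact absurd rfl h
  | cons d rest ih =>
      cases rest with
      | nil =>
          simp [get_all_coordinates, pvProd, List.flatMap_def]
      | cons d2 rest2 =>
          simp only [get_all_coordinates, PySem.List.foldl_append_singleton_eq_map,
            PySem.List.foldl_append_eq_flatMap, List.nil_append]
          rw [ih (by simp)]
          rfl

theorem alt_eq_prod (dims : List Int) : get_all_coordinates_alt dims = pvProd dims := by
  rw [get_all_coordinates_alt, alt_foldr_eq]

-- ===== VERDICT (by name: the statement is the Claim_ definition above) =====
theorem get_all_coordinates_spec : Claim_equal_get_all_coordinates := by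
  intro dims _ hpre
  unfold Spec_get_all_coordinates
  rw [a_eq_prod dims hpre, alt_eq_prod]
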